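-- pv_equiv track=rewrite | github.com/mggg/GerryChain | gerrychain/tree.py | get_max_prime_factor_less_than
-- ===== SOURCE A (Python) =====
-- from typing import (
--     Any,
--     Callable,
--     Dict,
--     List,
--     Optional,
--     Set,
--     Union,
--     Hashable,
--     Sequence,
--     Tuple,
-- )
--
-- def get_max_prime_factor_less_than(n: int, ceil: int) -> Optional[int]:
--     """
--     Helper function for recursive_seed_part_inner. Returns the largest prime factor of ``n``
--     less than ``ceil``, or None if all are greater than ceil.
--
--     :param n: The number to find the largest prime factor for.
--     :type n: int
--     :param ceil: The upper limit for the largest prime factor.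
--     :type ceil: int
--
--     :returns: The largest prime factor of ``n`` less than ``ceil``, or None if all are greater
--         than ceil.
--     :rtype: Optional[int]
--     """
--     if n <= 1 or ceil <= 1:
--         return None
--
--     largest_factor = None
--     while n % 2 == 0:
--         largest_factor = 2
--         n //= 2
--
--     i = 3
--     while i * i <= n:
--         while n % i == 0:
--             if i <= ceil:
--                 largest_factor = i
--             n //= i
--         i += 2
--
--     if n > 1 and n <= ceil:
--         largest_factor = n
--
--     return largest_factor
-- ===== SOURCE B (Python) =====
-- def get_max_prime_factor_less_than(n, ceil):
--     # Recursive peeling: at each level compute the smallest prime factor from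
--     # scratch, strip it out, recurse on the quotient, and resolve the answer on
--     # the way back by preferring the deeper (hence larger) factor.
--     if n <= 1 or ceil <= 1:
--         return None
--
--     def smallest_prime_factor(m):
--         if m % 2 == 0:
--             return 2
--         d = 3
--         while d * d <= m:
--             if m % d == 0:
--                 return d
--             d += 2
--         return m
--
--     def peel(m):
--         if m <= 1:
--             return None
--         p = smallest_prime_factor(m)
--         while m % p == 0:
--             m //= p
--         deeper = peel(m)
--         if deeper is not None:
--             return deeper
--         return p if p <= ceil else None
--
--     return peel(n)
-- ===== Notes on version B (the rewrite author's own statement) =====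
-- stated objective: alternative
-- what changed: B replaces A's single interleaved sweep with a running maximum by a recursive peel: each level computes the smallest prime factor from scratch (trial division restarting at 2), strips it out, recurses on the quotient, and combines on the way back by preferring the deeper (larger) factor; there is no running max and no ceil-test inside the division loops.
import Mathlib
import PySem

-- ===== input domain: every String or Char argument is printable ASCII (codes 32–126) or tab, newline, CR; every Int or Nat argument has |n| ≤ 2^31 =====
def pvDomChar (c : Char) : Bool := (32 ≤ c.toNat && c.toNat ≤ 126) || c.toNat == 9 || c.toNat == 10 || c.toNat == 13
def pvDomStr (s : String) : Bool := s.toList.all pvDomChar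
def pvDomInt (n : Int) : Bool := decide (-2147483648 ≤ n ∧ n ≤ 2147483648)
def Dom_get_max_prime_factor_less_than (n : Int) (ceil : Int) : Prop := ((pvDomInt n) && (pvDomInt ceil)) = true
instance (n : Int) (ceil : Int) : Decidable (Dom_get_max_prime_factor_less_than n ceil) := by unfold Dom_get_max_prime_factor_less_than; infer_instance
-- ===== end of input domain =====

-- B replaces A's single sweep with a running maximum by a recursive peel: each level
-- computes the smallest prime factor from scratch, strips it, recurses on the quotient
-- and prefers the deeper (larger) factor on the way back (objective: alternative).

-- decrease lemmas cited by the ports' decreasing_by clauses (termination only)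
theorem pv_dec_div2 (n : Int) (h : PySem.Int.mod n 2 = 0 ∧ 0 < n) :
    (PySem.Int.floordiv n 2).toNat < n.toNat := by
  rw [PySem.Int.floordiv_eq_ediv_of_pos (by norm_num)]
  have := PySem.Int.mod_eq_emod_of_pos (a := n) (b := 2) (by norm_num)
  omega

theorem pv_dec_divi (n i : Int) (h : PySem.Int.mod n i = 0 ∧ 0 < n ∧ 2 ≤ i) :
    (PySem.Int.floordiv n i).toNat < n.toNat := by
  rw [PySem.Int.floordiv_eq_ediv_of_pos (by omega)]
  have hdvd : i ∣ n := (PySem.Int.mod_eq_zero_iff_dvd _ _).1 h.1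
  have hmul : n / i * i = n := Int.ediv_mul_cancel hdvd
  have hq0 : 1 ≤ n / i := by
    have hge : 0 ≤ n / i := Int.ediv_nonneg (by omega) (by omega)
    nlinarith [h.2.1, h.2.2]
  have : n / i < n := by nlinarith [h.2.2]
  omega

theorem pv_dec_plus2 (m i : Int) (h : i * i ≤ m ∧ 3 ≤ i) :
    (m - (i + 2)).toNat < (m - i).toNat := by
  have h2 : i + i ≤ i * i := by nlinarith [h.2]
  omega

-- ===== PORT A =====
-- `while n % 2 == 0: largest_factor = 2; n //= 2` (the `0 < n` guard only makes the
-- recursion total; Python diverges there and the loop is only reached with n ≥ 2)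
def pyA_div2 (n : Int) (acc : Option Int) : Int × Option Int :=
  if h : PySem.Int.mod n 2 = 0 ∧ 0 < n then
    pyA_div2 (PySem.Int.floordiv n 2) (some 2)
  else (n, acc)
termination_by n.toNat
decreasing_by exact pv_dec_div2 n h

-- `while n % i == 0: if i <= ceil: largest_factor = i; n //= i`
def pyA_divi (n i ceil : Int) (acc : Option Int) : Int × Option Int :=
  if h : PySem.Int.mod n i = 0 ∧ 0 < n ∧ 2 ≤ i then
    pyA_divi (PySem.Int.floordiv n i) i ceil (if i ≤ ceil then some i else acc)
  else (n, acc)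
termination_by n.toNat
decreasing_by exact pv_dec_divi n i h

-- needed for the termination of pyA_outer (cited in its decreasing_by)
theorem pyA_divi_fst_le (n i ceil : Int) (acc : Option Int) : (pyA_divi n i ceil acc).1 ≤ n := by
  refine pyA_divi.induct i ceil (motive := fun n acc => (pyA_divi n i ceil acc).1 ≤ n) ?_ ?_ n acc
  · intro n acc h ih
    rw [pyA_divi, dif_pos h]
    have hstep : PySem.Int.floordiv n i ≤ n := by
      rw [PySem.Int.floordiv_eq_ediv_of_pos (by omega)]
      have hdvd : i ∣ n := (PySem.Int.mod_eq_zero_iff_dvd _ _).1 h.1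
      have hmul : n / i * i = n := Int.ediv_mul_cancel hdvd
      nlinarith [h.2.1, h.2.2]
    exact le_trans ih hstep
  · intro n acc h
    rw [pyA_divi, dif_neg h]

theorem pv_dec_outerA (n i ceil : Int) (acc : Option Int) (h : i * i ≤ n ∧ 3 ≤ i) :
    ((pyA_divi n i ceil acc).1 - (i + 2)).toNat < (n - i).toNat := by
  have h1 := pyA_divi_fst_le n i ceil acc
  have h2 : i + i ≤ i * i := by nlinarith [h.2]
  omega

-- `i = 3; while i * i <= n: …; i += 2` followed by the trailing
-- `if n > 1 and n <= ceil: largest_factor = n; return largest_factor`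
def pyA_outer (n i ceil : Int) (acc : Option Int) : Option Int :=
  if h : i * i ≤ n ∧ 3 ≤ i then
    pyA_outer (pyA_divi n i ceil acc).1 (i + 2) ceil (pyA_divi n i ceil acc).2
  else if 1 < n ∧ n ≤ ceil then some n else acc
termination_by (n - i).toNat
decreasing_by exact pv_dec_outerA n i ceil acc h

def get_max_prime_factor_less_than (n : Int) (ceil : Int) : Option Int :=
  if n ≤ 1 ∨ ceil ≤ 1 then none
  else pyA_outer (pyA_div2 n none).1 3 ceil (pyA_div2 n none).2

-- ===== PORT B =====
-- `d = 3; while d * d <= m: if m % d == 0: return d; d += 2; return m`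
-- (the `3 ≤ d` conjunct only makes the recursion total; spf always starts at d = 3)
def pyB_spf_loop (m d : Int) : Int :=
  if h : d * d ≤ m ∧ 3 ≤ d then
    if PySem.Int.mod m d = 0 then d else pyB_spf_loop m (d + 2)
  else m
termination_by (m - d).toNat
decreasing_by exact pv_dec_plus2 m d h

-- `def smallest_prime_factor(m): if m % 2 == 0: return 2; <loop above>`
def pyB_spf (m : Int) : Int :=
  if PySem.Int.mod m 2 = 0 then 2 else pyB_spf_loop m 3

-- `while m % p == 0: m //= p`
def pyB_divi (m i : Int) : Int :=
  if h : PySem.Int.mod m i = 0 ∧ 0 < m ∧ 2 ≤ i then pyB_divi (PySem.Int.floordiv m i) i else m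
termination_by m.toNat
decreasing_by exact pv_dec_divi m i h

-- needed for the termination of pyB_rec (cited in its decreasing_by)
theorem pyB_divi_le (m i : Int) : pyB_divi m i ≤ m := by
  refine pyB_divi.induct i (motive := fun m => pyB_divi m i ≤ m) ?_ ?_ m
  · intro m h ih
    rw [pyB_divi, dif_pos h]
    have hstep : PySem.Int.floordiv m i ≤ m := by
      rw [PySem.Int.floordiv_eq_ediv_of_pos (by omega)]
      have hdvd : i ∣ m := (PySem.Int.mod_eq_zero_iff_dvd _ _).1 h.1
      have hmul : m / i * i = m := Int.ediv_mul_cancel hdvd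
      nlinarith [h.2.1, h.2.2]
    exact le_trans ih hstep
  · intro m h
    rw [pyB_divi, dif_neg h]

theorem pyB_spf_loop_dvd (m : Int) (hm : 1 < m) :
    ∀ d : Int, 3 ≤ d → pyB_spf_loop m d ∣ m ∧ 2 ≤ pyB_spf_loop m d := by
  intro d hd
  refine pyB_spf_loop.induct m (motive := fun d => 3 ≤ d → pyB_spf_loop m d ∣ m ∧ 2 ≤ pyB_spf_loop m d) ?_ ?_ ?_ d hd
  · intro d h hmod _
    rw [pyB_spf_loop, dif_pos h, if_pos hmod]
    exact ⟨(PySem.Int.mod_eq_zero_iff_dvd _ _).1 hmod, by omega⟩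
  · intro d h hmod ih _
    rw [pyB_spf_loop, dif_pos h, if_neg hmod]
    exact ih (by omega)
  · intro d h _
    rw [pyB_spf_loop, dif_neg h]
    exact ⟨dvd_rfl, by omega⟩

theorem pyB_spf_dvd (m : Int) (hm : 1 < m) : pyB_spf m ∣ m ∧ 2 ≤ pyB_spf m := by
  rw [pyB_spf]
  by_cases he : PySem.Int.mod m 2 = 0
  · rw [if_pos he]
    exact ⟨(PySem.Int.mod_eq_zero_iff_dvd _ _).1 he, le_refl 2⟩
  · rw [if_neg he]
    exact pyB_spf_loop_dvd m hm 3 (by norm_num)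

theorem pv_dec_rec (m : Int) (h : 1 < m) : (pyB_divi m (pyB_spf m)).toNat < m.toNat := by
  obtain ⟨hdvd, hp2⟩ := pyB_spf_dvd m h
  set p := pyB_spf m with hp
  have hcond : PySem.Int.mod m p = 0 ∧ 0 < m ∧ 2 ≤ p :=
    ⟨(PySem.Int.mod_eq_zero_iff_dvd _ _).2 hdvd, by omega, hp2⟩
  have hstep : pyB_divi m p = pyB_divi (PySem.Int.floordiv m p) p := by
    rw [pyB_divi, dif_pos hcond]
  have hle : pyB_divi (PySem.Int.floordiv m p) p ≤ PySem.Int.floordiv m p := pyB_divi_le _ _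
  have hfd : PySem.Int.floordiv m p = m / p := PySem.Int.floordiv_eq_ediv_of_pos (by omega)
  have hmul : m / p * p = m := Int.ediv_mul_cancel hdvd
  have hge : 0 ≤ m / p := Int.ediv_nonneg (by omega) (by omega)
  have hlt : m / p < m := by nlinarith
  rw [hstep, hfd]
  have := Int.toNat_le_toNat (hfd ▸ hle)
  omega

-- `def peel(m): if m <= 1: return None; p = spf(m); divide p out; deeper = peel(m);
--  return deeper if deeper is not None else (p if p <= ceil else None)`
def pyB_rec (ceil m : Int) : Option Int :=
  if h : 1 < m then
    let p := pyB_spf m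
    match pyB_rec ceil (pyB_divi m p) with
    | some r => some r
    | none => if p ≤ ceil then some p else none
  else none
termination_by m.toNat
decreasing_by exact pv_dec_rec m h

def get_max_prime_factor_less_than_alt (n : Int) (ceil : Int) : Option Int :=
  if n ≤ 1 ∨ ceil ≤ 1 then none else pyB_rec ceil n

-- ===== PRECONDITION & SPEC =====
def Spec_get_max_prime_factor_less_than (n : Int) (ceil : Int) (out : Option Int) : Prop := out = get_max_prime_factor_less_than_alt n ceil
instance (n : Int) (ceil : Int) (out : Option Int) : Decidable (Spec_get_max_prime_factor_less_than n ceil out) := by unfold Spec_get_max_prime_factor_less_than; infer_instance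

-- ===== CLAIM (what is proved, stated in full; the proofs are below) =====
def Claim_equal_get_max_prime_factor_less_than : Prop := ∀ (n : Int) (ceil : Int), Dom_get_max_prime_factor_less_than n ceil → Spec_get_max_prime_factor_less_than n ceil (get_max_prime_factor_less_than n ceil)

-- ===== LEMMAS AND PROOFS =====

-- proof-side helper: B's divide-out loop specialised to 2 (to relate A's 2-stripping loop)
def pyB_div2 (m : Int) : Int :=
  if h : PySem.Int.mod m 2 = 0 ∧ 0 < m then pyB_div2 (PySem.Int.floordiv m 2) else m
termination_by m.toNat
decreasing_by exact pv_dec_div2 m h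

theorem pyA_div2_eq (n : Int) (acc : Option Int) :
    pyA_div2 n acc = (pyB_div2 n, if PySem.Int.mod n 2 = 0 ∧ 0 < n then some 2 else acc) := by
  induction n, acc using pyA_div2.induct with
  | case1 n acc h ih =>
    have h2 : pyB_div2 n = pyB_div2 (PySem.Int.floordiv n 2) := by rw [pyB_div2, dif_pos h]
    rw [pyA_div2, dif_pos h, ih, ite_self, if_pos h, h2]
  | case2 n acc h => rw [pyA_div2, dif_neg h, pyB_div2, dif_neg h, if_neg h]

theorem pyA_divi_eq (n i ceil : Int) (acc : Option Int) :
    pyA_divi n i ceil acc =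
      (pyB_divi n i,
       if PySem.Int.mod n i = 0 ∧ 0 < n ∧ 2 ≤ i then (if i ≤ ceil then some i else acc) else acc) := by
  refine pyA_divi.induct i ceil (motive := fun n acc => pyA_divi n i ceil acc =
      (pyB_divi n i,
       if PySem.Int.mod n i = 0 ∧ 0 < n ∧ 2 ≤ i then (if i ≤ ceil then some i else acc) else acc)) ?_ ?_ n acc
  · intro n acc h ih
    simp only [dite_eq_ite] at ih
    have h2 : pyB_divi n i = pyB_divi (PySem.Int.floordiv n i) i := by rw [pyB_divi, dif_pos h]
    rw [pyA_divi, dif_pos h, ih, if_pos h, h2]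
    rcases Classical.em (PySem.Int.mod (PySem.Int.floordiv n i) i = 0 ∧ 0 < PySem.Int.floordiv n i ∧ 2 ≤ i) with h4 | h4 <;>
      rcases Classical.em (i ≤ ceil) with h3 | h3 <;> simp [h4, h3]
  · intro n acc h
    rw [pyA_divi, dif_neg h, pyB_divi, dif_neg h, if_neg h]

theorem pyB_div2_pos (m : Int) (hm : 0 < m) : 0 < pyB_div2 m := by
  induction m using pyB_div2.induct with
  | case1 m h ih =>
    rw [pyB_div2, dif_pos h]
    refine ih ?_
    rw [PySem.Int.floordiv_eq_ediv_of_pos (by norm_num)]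
    have := PySem.Int.mod_eq_emod_of_pos (a := m) (b := 2) (by norm_num)
    omega
  | case2 m h => rw [pyB_div2, dif_neg h]; exact hm

theorem pyB_div2_odd (m : Int) (hm : 0 < m) : PySem.Int.mod (pyB_div2 m) 2 ≠ 0 := by
  induction m using pyB_div2.induct with
  | case1 m h ih =>
    rw [pyB_div2, dif_pos h]
    refine ih ?_
    rw [PySem.Int.floordiv_eq_ediv_of_pos (by norm_num)]
    have := PySem.Int.mod_eq_emod_of_pos (a := m) (b := 2) (by norm_num)
    omega
  | case2 m h => rw [pyB_div2, dif_neg h]; intro hc; exact h ⟨hc, hm⟩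

theorem pyB_div2_fix (m : Int) (ho : PySem.Int.mod m 2 ≠ 0) : pyB_div2 m = m := by
  rw [pyB_div2, dif_neg (by intro hc; exact ho hc.1)]

theorem pyB_divi_two (n : Int) : pyB_divi n 2 = pyB_div2 n := by
  induction n using pyB_div2.induct with
  | case1 n h ih =>
    rw [pyB_divi, dif_pos ⟨h.1, h.2, le_refl 2⟩, pyB_div2, dif_pos h, ih]
  | case2 n h =>
    rw [pyB_divi, dif_neg (by intro hc; exact h ⟨hc.1, hc.2.1⟩), pyB_div2, dif_neg h]

theorem pyB_divi_pos (m i : Int) (hm : 0 < m) (hi : 2 ≤ i) : 0 < pyB_divi m i := by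
  refine pyB_divi.induct i (motive := fun m => 0 < m → 0 < pyB_divi m i) ?_ ?_ m hm
  · intro m h ih _
    rw [pyB_divi, dif_pos h]
    refine ih ?_
    rw [PySem.Int.floordiv_eq_ediv_of_pos (by omega)]
    have hdvd : i ∣ m := (PySem.Int.mod_eq_zero_iff_dvd _ _).1 h.1
    have hmul : m / i * i = m := Int.ediv_mul_cancel hdvd
    have hge : 0 ≤ m / i := Int.ediv_nonneg (by omega) (by omega)
    nlinarith [h.2.1, h.2.2]
  · intro m h hm'
    rw [pyB_divi, dif_neg h]
    exact hm'

theorem pyB_divi_ndvd (m i : Int) (hm : 0 < m) (hi : 2 ≤ i) : ¬ i ∣ pyB_divi m i := by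
  refine pyB_divi.induct i (motive := fun m => 0 < m → ¬ i ∣ pyB_divi m i) ?_ ?_ m hm
  · intro m h ih _
    rw [pyB_divi, dif_pos h]
    refine ih ?_
    rw [PySem.Int.floordiv_eq_ediv_of_pos (by omega)]
    have hdvd : i ∣ m := (PySem.Int.mod_eq_zero_iff_dvd _ _).1 h.1
    have hmul : m / i * i = m := Int.ediv_mul_cancel hdvd
    have hge : 0 ≤ m / i := Int.ediv_nonneg (by omega) (by omega)
    nlinarith [h.2.1, h.2.2]
  · intro m h hm'
    rw [pyB_divi, dif_neg h]
    intro hc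
    exact h ⟨(PySem.Int.mod_eq_zero_iff_dvd _ _).2 hc, hm', hi⟩

theorem pyB_divi_self (m : Int) (hm : 1 < m) : pyB_divi m m = 1 := by
  have hcond : PySem.Int.mod m m = 0 ∧ 0 < m ∧ 2 ≤ m :=
    ⟨(PySem.Int.mod_eq_zero_iff_dvd _ _).2 dvd_rfl, by omega, by omega⟩
  rw [pyB_divi, dif_pos hcond]
  have hfd : PySem.Int.floordiv m m = 1 := by
    rw [PySem.Int.floordiv_eq_ediv_of_pos (by omega), Int.ediv_self (by omega)]
  rw [hfd, pyB_divi, dif_neg]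
  intro hc
  have h1 : PySem.Int.mod 1 m = 1 := by
    rw [PySem.Int.mod_eq_emod_of_pos (by omega), Int.emod_eq_of_lt (by omega) (by omega)]
  omega

-- under "no divisor below i", the restart-from-3 scan of spf lands exactly on i
theorem pyB_spf_loop_hits (m i : Int) (hi3 : 3 ≤ i) (hio : i % 2 = 1)
    (hdvd : i ∣ m) (hsq : i * i ≤ m) :
    ∀ (k : Nat) (d : Int), (i - d).toNat ≤ k → 3 ≤ d → d % 2 = 1 → d ≤ i →
      (∀ e : Int, d ≤ e → e < i → ¬ e ∣ m) → pyB_spf_loop m d = i := by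
  intro k
  induction k with
  | zero =>
    intro d hk hd3 hdo hdi hno
    have hdi' : d = i := by omega
    subst hdi'
    rw [pyB_spf_loop, dif_pos ⟨hsq, hd3⟩, if_pos ((PySem.Int.mod_eq_zero_iff_dvd _ _).2 hdvd)]
  | succ k ih =>
    intro d hk hd3 hdo hdi hno
    by_cases hde : d = i
    · subst hde
      rw [pyB_spf_loop, dif_pos ⟨hsq, hd3⟩, if_pos ((PySem.Int.mod_eq_zero_iff_dvd _ _).2 hdvd)]
    · have hdlt : d < i := by omega
      have hdsq : d * d ≤ m := by nlinarith
      rw [pyB_spf_loop, dif_pos ⟨hdsq, hd3⟩, if_neg (by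
        intro hc
        exact hno d le_rfl hdlt ((PySem.Int.mod_eq_zero_iff_dvd _ _).1 hc))]
      exact ih (d + 2) (by omega) (by omega) (by omega) (by omega)
        (fun e he1 he2 => hno e (by omega) he2)

-- when no d with d*d ≤ m divides m, the scan falls through and returns m
theorem pyB_spf_loop_self (m : Int) (hno : ∀ e : Int, 3 ≤ e → e * e ≤ m → ¬ e ∣ m) :
    ∀ d : Int, 3 ≤ d → pyB_spf_loop m d = m := by
  intro d hd
  refine pyB_spf_loop.induct m (motive := fun d => 3 ≤ d → pyB_spf_loop m d = m) ?_ ?_ ?_ d hd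
  · intro d h hmod hd3
    exact absurd ((PySem.Int.mod_eq_zero_iff_dvd _ _).1 hmod) (hno d hd3 h.1)
  · intro d h hmod ih hd3
    rw [pyB_spf_loop, dif_pos h, if_neg hmod]
    exact ih (by omega)
  · intro d h _
    rw [pyB_spf_loop, dif_neg h]

-- the exit of A's sweep versus B's peel on an m with no factor below its square root
theorem pv_bridge_exit (ceil m i : Int) (acc : Option Int)
    (hg : ¬ (i * i ≤ m ∧ 3 ≤ i)) (hm : 0 < m) (hi : 3 ≤ i)
    (hinv : ∀ d : Int, 2 ≤ d → d < i → ¬ d ∣ m) :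
    pyA_outer m i ceil acc = (pyB_rec ceil m).elim acc some := by
  rw [pyA_outer, dif_neg hg]
  have hsq : m < i * i := by
    rcases not_and_or.1 hg with h | h
    · omega
    · omega
  by_cases hm1 : 1 < m
  · have hmodd : PySem.Int.mod m 2 ≠ 0 := by
      intro hc
      exact hinv 2 le_rfl (by omega) ((PySem.Int.mod_eq_zero_iff_dvd _ _).1 hc)
    have hspf : pyB_spf m = m := by
      rw [pyB_spf, if_neg hmodd]
      refine pyB_spf_loop_self m ?_ 3 (by norm_num)
      intro e he3 hesq hedvd
      have helt : e < i := by nlinarith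
      exact hinv e (by omega) helt hedvd
    rw [pyB_rec, dif_pos hm1]
    simp only [hspf, pyB_divi_self m hm1]
    rw [pyB_rec, dif_neg (by norm_num : ¬ (1:Int) < 1)]
    by_cases hc : m ≤ ceil
    · rw [if_pos ⟨hm1, hc⟩, if_pos hc]
      rfl
    · rw [if_neg (by intro h; exact hc h.2), if_neg hc]
      rfl
  · have hme : m = 1 := by omega
    subst hme
    rw [pyB_rec, dif_neg (by norm_num : ¬ (1:Int) < 1)]
    rw [if_neg (by intro h; exact absurd h.1 (by norm_num))]
    rfl

-- the heart of the proof: A's interleaved sweep with a running max versus B's recursive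
-- peel, related by "A's answer is B's deeper answer, defaulting to acc"
theorem pv_bridge (ceil : Int) : ∀ (k : Nat) (m i : Int) (acc : Option Int),
    (m - i).toNat ≤ k → 0 < m → 3 ≤ i → i % 2 = 1 →
    (∀ d : Int, 2 ≤ d → d < i → ¬ d ∣ m) →
    pyA_outer m i ceil acc = (pyB_rec ceil m).elim acc some := by
  intro k
  induction k with
  | zero =>
    intro m i acc hk hm hi hio hinv
    by_cases hg : i * i ≤ m ∧ 3 ≤ i
    · exfalso
      have h2 : i + i ≤ i * i := by nlinarith [hg.2]
      omega
    · exact pv_bridge_exit ceil m i acc hg hm hi hinv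
  | succ k ih =>
    intro m i acc hk hm hi hio hinv
    by_cases hg : i * i ≤ m ∧ 3 ≤ i
    · have hii : i + i ≤ i * i := by nlinarith [hg.2]
      rw [pyA_outer, dif_pos hg, pyA_divi_eq]
      by_cases hd : PySem.Int.mod m i = 0
      · -- i divides m: A strips i and updates acc; B's spf finds exactly i
        have hcond : PySem.Int.mod m i = 0 ∧ 0 < m ∧ 2 ≤ i := ⟨hd, hm, by omega⟩
        simp only [if_pos hcond]
        have hm1 : 1 < m := by nlinarith [hg.1, hg.2]
        have hmodd : PySem.Int.mod m 2 ≠ 0 := by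
          intro hc
          exact hinv 2 le_rfl (by omega) ((PySem.Int.mod_eq_zero_iff_dvd _ _).1 hc)
        have hspf : pyB_spf m = i := by
          rw [pyB_spf, if_neg hmodd]
          exact pyB_spf_loop_hits m i (by omega) hio
            ((PySem.Int.mod_eq_zero_iff_dvd _ _).1 hd) hg.1 (i - 3).toNat 3 le_rfl
            (by norm_num) (by norm_num) (by omega)
            (fun e he1 he2 => hinv e (by omega) he2)
        have hmpos : 0 < pyB_divi m i := pyB_divi_pos m i hm (by omega)
        have hmle : pyB_divi m i ≤ m := pyB_divi_le m i
        have hdvdm : pyB_divi m i ∣ m := by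
          refine pyB_divi.induct i (motive := fun m => pyB_divi m i ∣ m) ?_ ?_ m
          · intro m h ihd
            rw [pyB_divi, dif_pos h]
            refine dvd_trans ihd ?_
            have hdvd : i ∣ m := (PySem.Int.mod_eq_zero_iff_dvd _ _).1 h.1
            have hmul : m / i * i = m := Int.ediv_mul_cancel hdvd
            rw [PySem.Int.floordiv_eq_ediv_of_pos (by omega)]
            exact ⟨i, by linarith⟩
          · intro m h
            rw [pyB_divi, dif_neg h]
        have hinv' : ∀ d : Int, 2 ≤ d → d < i + 2 → ¬ d ∣ pyB_divi m i := by
          intro d hd2 hdlt hddvd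
          rcases lt_trichotomy d i with hlt | heq | hgt
          · exact hinv d hd2 hlt (dvd_trans hddvd hdvdm)
          · exact pyB_divi_ndvd m i hm (by omega) (heq ▸ hddvd)
          · have h2d : (2:Int) ∣ d := by omega
            have : (2:Int) ∣ m := dvd_trans (dvd_trans h2d hddvd) hdvdm
            exact hinv 2 le_rfl (by omega) this
        rw [ih (pyB_divi m i) (i + 2) _ (by omega) hmpos (by omega) (by omega) hinv']
        have hR : pyB_rec ceil m =
            (match pyB_rec ceil (pyB_divi m (pyB_spf m)) with
             | some r => some r
             | none => if pyB_spf m ≤ ceil then some (pyB_spf m) else none) := by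
          rw [pyB_rec, dif_pos hm1]
        rw [hspf] at hR
        rw [hR]
        cases hr : pyB_rec ceil (pyB_divi m i) with
        | some r => simp
        | none =>
          simp only [Option.elim]
          split <;> rfl
      · -- i does not divide m: both sides just skip i
        have hcond : ¬ (PySem.Int.mod m i = 0 ∧ 0 < m ∧ 2 ≤ i) := by intro hc; exact hd hc.1
        have hfix : pyB_divi m i = m := by rw [pyB_divi, dif_neg hcond]
        simp only [if_neg hcond, hfix]
        refine ih m (i + 2) acc (by omega) hm (by omega) (by omega) ?_
        intro d hd2 hdlt hddvd
        rcases lt_trichotomy d i with hlt | heq | hgt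
        · exact hinv d hd2 hlt hddvd
        · exact hd ((PySem.Int.mod_eq_zero_iff_dvd _ _).2 (heq ▸ hddvd))
        · have h2d : (2:Int) ∣ d := by omega
          exact hinv 2 le_rfl (by omega) (dvd_trans h2d hddvd)
    · exact pv_bridge_exit ceil m i acc hg hm hi hinv

-- ===== VERDICT (by name: the statement is the Claim_ definition above) =====
theorem get_max_prime_factor_less_than_spec : Claim_equal_get_max_prime_factor_less_than := by
  intro n ceil _
  unfold Spec_get_max_prime_factor_less_than
  unfold get_max_prime_factor_less_than get_max_prime_factor_less_than_alt
  by_cases h0 : n ≤ 1 ∨ ceil ≤ 1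
  · simp [h0]
  · rw [if_neg h0, if_neg h0]
    have hn1 : 1 < n := by omega
    have hc1 : 1 < ceil := by omega
    rw [pyA_div2_eq]
    by_cases he : PySem.Int.mod n 2 = 0
    · -- even n: A strips the 2s up front with acc = 2; B's first peel level strips 2
      have hcond : PySem.Int.mod n 2 = 0 ∧ 0 < n := ⟨he, by omega⟩
      simp only [if_pos hcond]
      have hb := pv_bridge ceil ((pyB_div2 n - 3).toNat) (pyB_div2 n) 3 (some 2) le_rfl
        (pyB_div2_pos n (by omega)) le_rfl (by norm_num) ?_
      · rw [hb]
        have hspf : pyB_spf n = 2 := by rw [pyB_spf, if_pos he]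
        have hR : pyB_rec ceil n =
            (match pyB_rec ceil (pyB_divi n (pyB_spf n)) with
             | some r => some r
             | none => if pyB_spf n ≤ ceil then some (pyB_spf n) else none) := by
          rw [pyB_rec, dif_pos (show (1:Int) < n by omega)]
        rw [hspf, pyB_divi_two] at hR
        rw [hR]
        cases hr : pyB_rec ceil (pyB_div2 n) with
        | some r => simp
        | none =>
          simp only [Option.elim]
          rw [if_pos (show (2:Int) ≤ ceil by omega)]
      · intro d hd2 hdlt hdvd
        have hde : d = 2 := by omega
        subst hde
        exact pyB_div2_odd n (by omega) ((PySem.Int.mod_eq_zero_iff_dvd _ _).2 hdvd)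
    · -- odd n: A's 2-loop is a no-op with acc = none
      have hcond : ¬ (PySem.Int.mod n 2 = 0 ∧ 0 < n) := by intro hc; exact he hc.1
      simp only [if_neg hcond]
      rw [pyB_div2_fix n he] at *
      have hb := pv_bridge ceil ((n - 3).toNat) n 3 none le_rfl (by omega) le_rfl (by norm_num) ?_
      · rw [hb]
        cases pyB_rec ceil n <;> rfl
      · intro d hd2 hdlt hdvd
        have hde : d = 2 := by omega
        subst hde
        exact he ((PySem.Int.mod_eq_zero_iff_dvd _ _).2 hdvd)
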